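-- pv_equiv track=rewrite | github.com/erickchicatto1/LeetCodePractice | climbingLeaderboard.py | createRank
-- ===== SOURCE A (Python) =====
-- def createRank(scores):
--     # Esta función crea la lista de posiciones (1, 2, 2, 3...)
--     rank = []
--     currScore = scores[0]
--     count = 1
--
--     for score in scores:
--         if score != currScore:
--             currScore = score
--             count += 1
--         rank.append(count)
--
--     return rank
-- ===== SOURCE B (Python) =====
-- def createRank(scores):
--     # Phase 1: run-length encode consecutive equal scores.
--     runs = []            # lengths of maximal consecutive runs, in order
--     pend_val = None
--     pend_len = 0
--     for s in scores:
--         if pend_len and pend_val == s: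
--             pend_len += 1
--         else:
--             if pend_len:
--                 runs.append(pend_len)
--             pend_val, pend_len = s, 1
--     if pend_len:
--         runs.append(pend_len)
--     # Phase 2: expand: the r-th run gets rank r.
--     rank = []
--     for r, length in enumerate(runs, 1):
--         rank.extend([r] * length)
--     return rank
-- ===== Notes on version B (the rewrite author's own statement) =====
-- stated objective: alternative
-- what changed: B run-length-encodes the list into consecutive run lengths in a first pass and then expands run r to rank r repeated, instead of A's single pass comparing each element to the previous score while counting.
import Mathlib
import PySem

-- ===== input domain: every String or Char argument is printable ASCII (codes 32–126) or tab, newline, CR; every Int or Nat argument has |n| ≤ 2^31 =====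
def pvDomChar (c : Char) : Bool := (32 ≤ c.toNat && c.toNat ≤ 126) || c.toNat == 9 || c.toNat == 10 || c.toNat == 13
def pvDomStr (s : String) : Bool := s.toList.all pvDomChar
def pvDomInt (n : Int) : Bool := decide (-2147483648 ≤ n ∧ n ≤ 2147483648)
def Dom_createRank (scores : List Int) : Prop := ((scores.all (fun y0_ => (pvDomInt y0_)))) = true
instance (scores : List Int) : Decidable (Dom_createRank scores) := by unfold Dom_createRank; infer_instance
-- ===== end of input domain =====

-- B replaces A's single running-comparison pass by run-length encoding then expansion (alternative decomposition, same cost); A raises IndexError on [], B returns [].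


-- ===== PORT A =====
-- A reads the first element up front, which raises IndexError on an empty list; Pre_ excludes [], the .getD 0 is never the
-- computed value on admitted inputs.
def createRank (scores : List Int) : List Int :=
  let currScore := (PySem.List.pyGet? scores 0).getD 0
  (scores.foldl
    (fun (st : List Int × Int × Int) score =>
      let (rank, currScore, count) := st
      if score ≠ currScore then (rank ++ [count + 1], score, count + 1)
      else (rank ++ [count], currScore, count))
    ([], currScore, 1)).1

-- ===== PORT B =====
-- Phase 1 of Source B: run-length encode. pend_val = None is ported as 0: Python's
-- `pend_len and pend_val == s` never looks at None because pend_len = 0 short-circuits,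
-- exactly as here the conjunct pl ≠ 0 fails.
def pvRunsStep (st : List Int × Int × Int) (s : Int) : List Int × Int × Int :=
  let (runs, pv, pl) := st
  if pl ≠ 0 ∧ pv = s then (runs, pv, pl + 1)
  else ((if pl ≠ 0 then runs ++ [pl] else runs), s, 1)

-- Phase 2 of Source B: `for r, length in enumerate(runs, 1): rank.extend([r] * length)`.
def pvExpandStep (st : List Int × Int) (len : Int) : List Int × Int :=
  (st.1 ++ List.replicate len.toNat (st.2 + 1), st.2 + 1)

def createRank_alt (scores : List Int) : List Int :=
  let st := scores.foldl pvRunsStep ([], 0, 0)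
  let runs := if st.2.2 ≠ 0 then st.1 ++ [st.2.2] else st.1
  (runs.foldl pvExpandStep ([], 0)).1

-- ===== PRECONDITION & SPEC =====
-- Pre_ excludes only the empty list, on which A raises IndexError at the initial first-element access.
def Pre_createRank (scores : List Int) : Prop := scores ≠ []
instance (scores : List Int) : Decidable (Pre_createRank scores) := by
  unfold Pre_createRank; infer_instance
def pvWitness_createRank : List Int := [100, 100, 50]

def Spec_createRank (scores : List Int) (out : List Int) : Prop := out = createRank_alt scores
instance (scores : List Int) (out : List Int) : Decidable (Spec_createRank scores out) := by
  unfold Spec_createRank; infer_instance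

-- ===== CLAIM (what is proved, stated in full; the proofs are below) =====
def Claim_equal_createRank : Prop := ∀ (scores : List Int), Dom_createRank scores → Pre_createRank scores → Spec_createRank scores (createRank scores)

-- ===== LEMMAS AND PROOFS =====

-- Reference recursion: ranks emitted while the current score is `cur` carrying counter `cnt`.
def pvGo (cur cnt : Int) : List Int → List Int
  | [] => []
  | s :: rest =>
    if s ≠ cur then (cnt + 1) :: pvGo s (cnt + 1) rest
    else cnt :: pvGo cur cnt rest

-- Forward run lengths with a pending run of length k of value v.
def pvFRuns (v k : Int) : List Int → List Int
  | [] => [k]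
  | s :: rest => if v = s then pvFRuns v (k + 1) rest else k :: pvFRuns s 1 rest

-- Expansion of a list of run lengths starting after counter cnt.
def pvEmit (cnt : Int) : List Int → List Int
  | [] => []
  | l :: rest => List.replicate l.toNat (cnt + 1) ++ pvEmit (cnt + 1) rest

theorem pvFoldA_eq (xs : List Int) : ∀ (rank : List Int) (cur cnt : Int),
    (xs.foldl
      (fun (st : List Int × Int × Int) score =>
        let (rank, currScore, count) := st
        if score ≠ currScore then (rank ++ [count + 1], score, count + 1)
        else (rank ++ [count], currScore, count))
      (rank, cur, cnt)).1 = rank ++ pvGo cur cnt xs := by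
  induction xs with
  | nil => intro rank cur cnt; simp [pvGo]
  | cons x xs ih =>
    intro rank cur cnt
    by_cases h : x ≠ cur
    · simpa [List.foldl, h, pvGo] using ih (rank ++ [cnt + 1]) x (cnt + 1)
    · simpa [List.foldl, h, pvGo] using ih (rank ++ [cnt]) cur cnt

theorem pvFoldRuns_eq (xs : List Int) : ∀ (rs : List Int) (v k : Int), 1 ≤ k →
    (if (xs.foldl pvRunsStep (rs, v, k)).2.2 ≠ 0 then
      (xs.foldl pvRunsStep (rs, v, k)).1 ++ [(xs.foldl pvRunsStep (rs, v, k)).2.2]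
     else (xs.foldl pvRunsStep (rs, v, k)).1) = rs ++ pvFRuns v k xs := by
  induction xs with
  | nil =>
    intro rs v k hk
    have : k ≠ 0 := by omega
    simp [pvFRuns, this]
  | cons x xs ih =>
    intro rs v k hk
    have hk0 : k ≠ 0 := by omega
    by_cases h : v = x
    · simpa [List.foldl, pvRunsStep, hk0, h, pvFRuns] using ih rs v (k + 1) (by omega)
    · simpa [List.foldl, pvRunsStep, hk0, h, pvFRuns] using ih (rs ++ [k]) x 1 (by omega)

theorem pvFoldExpand_eq (rl : List Int) : ∀ (rank : List Int) (cnt : Int),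
    (rl.foldl pvExpandStep (rank, cnt)).1 = rank ++ pvEmit cnt rl := by
  induction rl with
  | nil => intro rank cnt; simp [pvEmit]
  | cons l rl ih => intro rank cnt; simp [List.foldl, pvExpandStep, pvEmit, ih]

theorem pvEmit_fRuns (xs : List Int) : ∀ (v k cnt : Int), 1 ≤ k →
    pvEmit cnt (pvFRuns v k xs) = List.replicate k.toNat (cnt + 1) ++ pvGo v (cnt + 1) xs := by
  induction xs with
  | nil => intro v k cnt hk; simp [pvFRuns, pvEmit, pvGo]
  | cons s xs ih =>
    intro v k cnt hk
    by_cases h : v = s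
    · have h' : ¬ s ≠ v := by simp [h.symm]
      rw [pvFRuns, if_pos h, ih v (k + 1) cnt (by omega), pvGo, if_neg h']
      have hrep : (k + 1).toNat = k.toNat + 1 := by omega
      rw [hrep, List.replicate_succ']
      simp
    · have h' : s ≠ v := fun e => h e.symm
      rw [pvFRuns, if_neg h, pvEmit, ih s 1 (cnt + 1) (by omega), pvGo, if_pos (by simpa using h')]
      simp

theorem pvMain (x : Int) (xs : List Int) :
    createRank (x :: xs) = createRank_alt (x :: xs) := by
  have hA : createRank (x :: xs) = pvGo x 1 (x :: xs) := by
    simpa [createRank, PySem.List.pyGet?, PySem.List.pyIdx?] using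
      pvFoldA_eq (x :: xs) [] x 1
  have hgo : pvGo x 1 (x :: xs) = 1 :: pvGo x 1 xs := by
    simp [pvGo]
  have hB : createRank_alt (x :: xs) = pvEmit 0 (pvFRuns x 1 xs) := by
    have h1 : (x :: xs).foldl pvRunsStep ([], 0, 0) = xs.foldl pvRunsStep ([], x, 1) := by
      simp [List.foldl, pvRunsStep]
    have h2 := pvFoldRuns_eq xs [] x 1 (by omega)
    simp only [createRank_alt, h1, List.nil_append] at *
    rw [h2]
    simpa using pvFoldExpand_eq (pvFRuns x 1 xs) [] 0
  have hE := pvEmit_fRuns xs x 1 0 (by omega)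
  rw [hA, hgo, hB, hE]
  norm_num [List.replicate]

-- ===== VERDICT (by name: the statement is the Claim_ definition above) =====
theorem createRank_spec : Claim_equal_createRank := by
  intro scores _ hpre
  unfold Spec_createRank
  cases scores with
  | nil => exact absurd rfl hpre
  | cons x xs => exact pvMain x xs
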